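-- pv_equiv track=rewrite | github.com/Maj0rTim/Image_Processing_Target_Scoring_System | Target_scoring.py | score_bullets
-- ===== SOURCE A (Python) =====
-- def score_bullets(coords, rings):
--     num = 0
--     score = 0
--     iteration = 10
--     for coord in coords:
--         i, j = (coord[0][0][0], coord[0][0][1 ])
--         for X, Y, R in rings:
--             if ((i - X) * (i - X) + (j - Y) * (j - Y) <= R * R):
--                 num += 1
--                 score += iteration
--                 iteration -=1
--                 break
--             else:
--                 continue
--     return score, num
-- ===== SOURCE B (Python) =====
-- def score_bullets(coords, rings):
--     # Inverted traversal: stamp each ring onto the bullet indices it contains,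
--     # union the stamps in a set, then score the hit count by the closed-form
--     # arithmetic series 10 + 9 + ... (num terms).
--     hit = set()
--     for X, Y, R in rings:
--         for idx, coord in enumerate(coords):
--             i, j = coord[0][0][0], coord[0][0][1]
--             if (i - X) * (i - X) + (j - Y) * (j - Y) <= R * R:
--                 hit.add(idx)
--     num = len(hit)
--     return 10 * num - num * (num - 1) // 2, num
-- ===== Notes on version B (the rewrite author's own statement) =====
-- stated objective: alternative
-- what changed: Inverts the traversal: instead of A's per-bullet break-scan over rings with (num, score, iteration) accumulators, B loops over rings stamping the indices of bullets each ring contains into a set, takes num as the set's size, and computes the score by the closed-form arithmetic series 10*num - num*(num-1)//2.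
import Mathlib
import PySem

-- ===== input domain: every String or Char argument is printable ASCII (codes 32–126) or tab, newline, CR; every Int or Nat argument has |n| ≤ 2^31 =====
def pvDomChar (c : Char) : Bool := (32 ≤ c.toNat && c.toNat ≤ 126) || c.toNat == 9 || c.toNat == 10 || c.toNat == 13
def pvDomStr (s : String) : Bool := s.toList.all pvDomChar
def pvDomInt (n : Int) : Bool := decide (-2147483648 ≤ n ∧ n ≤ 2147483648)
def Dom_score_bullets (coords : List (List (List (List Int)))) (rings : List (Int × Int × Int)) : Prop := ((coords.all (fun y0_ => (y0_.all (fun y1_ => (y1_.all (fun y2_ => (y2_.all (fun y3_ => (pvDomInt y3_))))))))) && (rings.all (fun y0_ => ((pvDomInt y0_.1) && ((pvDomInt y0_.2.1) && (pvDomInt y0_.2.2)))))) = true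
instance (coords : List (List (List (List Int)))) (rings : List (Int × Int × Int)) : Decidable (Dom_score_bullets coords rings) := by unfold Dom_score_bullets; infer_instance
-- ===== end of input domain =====

-- B inverts A's traversal: it loops over rings stamping hit bullet indices into a
-- set, then scores the hit count with the closed-form series 10*num - num*(num-1)//2
-- (objective: alternative).

-- ===== PORT A =====
-- point extracted as coord[0][0][0], coord[0][0][1]; Pre_ guarantees the indices
-- are in range, so the getD defaults are never reached on admitted inputs.
def pvPoint (coord : List (List (List Int))) : Int × Int :=
  let inner : List Int := (PySem.List.pyGet? ((PySem.List.pyGet? coord 0).getD []) 0).getD []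
  ((PySem.List.pyGet? inner 0).getD 0, (PySem.List.pyGet? inner 1).getD 0)

-- the inner 'for X, Y, R in rings: … break' scan of A
def pvHitA (i j : Int) : List (Int × Int × Int) → Bool
  | [] => false
  | (X, Y, R) :: rest =>
    if (i - X) * (i - X) + (j - Y) * (j - Y) ≤ R * R then true else pvHitA i j rest

-- the outer loop of A over (num, score, iteration)
def pvLoopA (rings : List (Int × Int × Int)) :
    List (List (List (List Int))) → Int → Int → Int → Int × Int
  | [], num, score, _ => (score, num)
  | coord :: rest, num, score, iteration =>
    let p := pvPoint coord
    if pvHitA p.1 p.2 rings then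
      pvLoopA rings rest (num + 1) (score + iteration) (iteration - 1)
    else
      pvLoopA rings rest num score iteration

def score_bullets (coords : List (List (List (List Int)))) (rings : List (Int × Int × Int)) : Int × Int :=
  pvLoopA rings coords 0 0 10

-- ===== PORT B =====
-- 'if (i-X)*(i-X) + (j-Y)*(j-Y) <= R*R' for ring r at bullet coord
def pvIn (r : Int × Int × Int) (coord : List (List (List Int))) : Bool :=
  decide (((pvPoint coord).1 - r.1) * ((pvPoint coord).1 - r.1)
    + ((pvPoint coord).2 - r.2.1) * ((pvPoint coord).2 - r.2.1) ≤ r.2.2 * r.2.2)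

-- B's inner loop: 'for idx, coord in enumerate(coords): … hit.add(idx)'
def pvMarkRing (coords : List (List (List (List Int)))) (s : PySem.Set Int) (r : Int × Int × Int) : PySem.Set Int :=
  (PySem.List.enumerate coords 0).foldl
    (fun s p => if pvIn r p.2 then PySem.Set.add s p.1 else s) s

def score_bullets_alt (coords : List (List (List (List Int)))) (rings : List (Int × Int × Int)) : Int × Int :=
  let hit : PySem.Set Int := rings.foldl (pvMarkRing coords) PySem.Set.empty
  let num : Int := (hit.length : Int)
  (10 * num - PySem.Int.floordiv (num * (num - 1)) 2, num)

-- ===== PRECONDITION & SPEC =====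
-- Pre_ excludes exactly the inputs on which A raises IndexError: a coord lacking
-- coord[0][0][0] or coord[0][0][1].
def Pre_score_bullets (coords : List (List (List (List Int)))) (rings : List (Int × Int × Int)) : Prop :=
  ∀ c ∈ coords, 1 ≤ c.length ∧ 1 ≤ (c.headD []).length ∧ 2 ≤ ((c.headD []).headD []).length

instance (coords : List (List (List (List Int)))) (rings : List (Int × Int × Int)) : Decidable (Pre_score_bullets coords rings) := by unfold Pre_score_bullets; infer_instance

def pvWitness_score_bullets : List (List (List (List Int))) × (List (Int × Int × Int)) :=
  ([[[[0, 0]]], [[[3, 4]]]], [(0, 0, 2)])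

def Spec_score_bullets (coords : List (List (List (List Int)))) (rings : List (Int × Int × Int)) (out : Int × Int) : Prop := out = score_bullets_alt coords rings
instance (coords : List (List (List (List Int)))) (rings : List (Int × Int × Int)) (out : Int × Int) : Decidable (Spec_score_bullets coords rings out) := by unfold Spec_score_bullets; infer_instance

-- ===== CLAIM (what is proved, stated in full; the proofs are below) =====
def Claim_equal_score_bullets : Prop := ∀ (coords : List (List (List (List Int)))) (rings : List (Int × Int × Int)), Dom_score_bullets coords rings → Pre_score_bullets coords rings → Spec_score_bullets coords rings (score_bullets coords rings)

-- ===== LEMMAS AND PROOFS =====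

-- membership test shared by the two characterisations
def pvPred (rings : List (Int × Int × Int)) (coord : List (List (List Int))) : Bool :=
  rings.any (fun r => pvIn r coord)

-- ---------- A side: the loop computes (pvSumDec hits 10, hits) ----------

-- the sum iteration + (iteration-1) + … over c hits
def pvSumDec : Nat → Int → Int
  | 0, _ => 0
  | c + 1, n => n + pvSumDec c (n - 1)

lemma pvHitA_eq_pred (c : List (List (List Int))) (rings : List (Int × Int × Int)) :
    pvHitA (pvPoint c).1 (pvPoint c).2 rings = pvPred rings c := by
  induction rings with
  | nil => rfl
  | cons r rest ih =>
    obtain ⟨X, Y, R⟩ := r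
    by_cases h : ((pvPoint c).1 - X) * ((pvPoint c).1 - X)
        + ((pvPoint c).2 - Y) * ((pvPoint c).2 - Y) ≤ R * R <;>
      simp [pvHitA, pvPred, pvIn, h, ih]

lemma pvLoopA_spec (rings : List (Int × Int × Int)) (coords : List (List (List (List Int))))
    (num score iter : Int) :
    pvLoopA rings coords num score iter
      = (score + pvSumDec ((coords.filter (pvPred rings)).length) iter,
         num + ((coords.filter (pvPred rings)).length : Int)) := by
  induction coords generalizing num score iter with
  | nil => simp [pvLoopA, pvSumDec]
  | cons coord rest ih =>
    by_cases h : pvPred rings coord = true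
    · simp only [pvLoopA, pvHitA_eq_pred, h, if_true, List.filter_cons_of_pos h,
        List.length_cons, pvSumDec, ih, Prod.mk.injEq]
      constructor <;> push_cast <;> ring
    · have h' : pvPred rings coord = false := by simpa using h
      simp [pvLoopA, pvHitA_eq_pred, h', ih]

lemma pvSumDec_closed (c : Nat) (n : Int) :
    2 * pvSumDec c n = 2 * n * (c : Int) - (c : Int) * ((c : Int) - 1) := by
  induction c generalizing n with
  | zero => simp [pvSumDec]
  | succ c ih =>
    simp only [pvSumDec]
    push_cast
    have := ih (n - 1)
    ring_nf
    ring_nf at this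
    omega

lemma pvSumDec_eq_formula (c : Nat) :
    pvSumDec c 10 = 10 * (c : Int) - PySem.Int.floordiv ((c : Int) * ((c : Int) - 1)) 2 := by
  have h2 := pvSumDec_closed c 10
  have hx : (c : Int) * ((c : Int) - 1) = 2 * (10 * (c : Int) - pvSumDec c 10) := by omega
  rw [hx, PySem.Int.floordiv, Int.mul_fdiv_cancel_left _ (by norm_num)]
  omega

-- ---------- B side: the hit set has as many elements as the filtered list ----------

lemma mem_markRing (coords : List (List (List (List Int)))) (r : Int × Int × Int)
    (s : PySem.Set Int) (x : Int) :
    x ∈ pvMarkRing coords s r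
      ↔ x ∈ s ∨ ∃ p ∈ PySem.List.enumerate coords 0, pvIn r p.2 = true ∧ x = p.1 := by
  unfold pvMarkRing
  generalize PySem.List.enumerate coords 0 = l
  induction l generalizing s with
  | nil => simp
  | cons p t ih =>
    by_cases h : pvIn r p.2 = true
    · simp only [List.foldl_cons, h, if_true, ih, PySem.Set.mem_add]
      constructor
      · rintro (⟨hs | hx⟩ | ⟨q, hq, hin, hxq⟩)
        · exact Or.inl hs
        · exact Or.inr ⟨p, List.mem_cons_self .., h, hx⟩
        · exact Or.inr ⟨q, List.mem_cons_of_mem _ hq, hin, hxq⟩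
      · rintro (hs | ⟨q, hq, hin, hxq⟩)
        · exact Or.inl (Or.inl hs)
        · rcases List.mem_cons.1 hq with rfl | hq
          · exact Or.inl (Or.inr hxq)
          · exact Or.inr ⟨q, hq, hin, hxq⟩
    · simp only [List.foldl_cons, h, if_false]
      rw [ih]
      constructor
      · rintro (hs | ⟨q, hq, hin, hxq⟩)
        · exact Or.inl hs
        · exact Or.inr ⟨q, List.mem_cons_of_mem _ hq, hin, hxq⟩
      · rintro (hs | ⟨q, hq, hin, hxq⟩)
        · exact Or.inl hs
        · rcases List.mem_cons.1 hq with rfl | hq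
          · exact absurd hin h
          · exact Or.inr ⟨q, hq, hin, hxq⟩

lemma nodup_markRing (coords : List (List (List (List Int)))) (r : Int × Int × Int)
    (s : PySem.Set Int) (hs : s.Nodup) : (pvMarkRing coords s r).Nodup := by
  unfold pvMarkRing
  generalize PySem.List.enumerate coords 0 = l
  induction l generalizing s with
  | nil => exact hs
  | cons p t ih =>
    simp only [List.foldl_cons]
    split
    · exact ih _ (PySem.Set.nodup_add _ _ hs)
    · exact ih _ hs

lemma mem_hitFold (coords : List (List (List (List Int)))) (rings : List (Int × Int × Int))
    (s : PySem.Set Int) (x : Int) :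
    x ∈ rings.foldl (pvMarkRing coords) s
      ↔ x ∈ s ∨ ∃ p ∈ PySem.List.enumerate coords 0, pvPred rings p.2 = true ∧ x = p.1 := by
  induction rings generalizing s with
  | nil => simp [pvPred]
  | cons r rest ih =>
    simp only [List.foldl_cons, ih, mem_markRing, pvPred, List.any_cons, Bool.or_eq_true]
    constructor
    · rintro ((hs | ⟨q, hq, hin, hxq⟩) | ⟨q, hq, hin, hxq⟩)
      · exact Or.inl hs
      · exact Or.inr ⟨q, hq, Or.inl hin, hxq⟩
      · exact Or.inr ⟨q, hq, Or.inr hin, hxq⟩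
    · rintro (hs | ⟨q, hq, hin | hin, hxq⟩)
      · exact Or.inl (Or.inl hs)
      · exact Or.inl (Or.inr ⟨q, hq, hin, hxq⟩)
      · exact Or.inr ⟨q, hq, hin, hxq⟩

lemma nodup_hitFold (coords : List (List (List (List Int)))) (rings : List (Int × Int × Int))
    (s : PySem.Set Int) (hs : s.Nodup) : (rings.foldl (pvMarkRing coords) s).Nodup := by
  induction rings generalizing s with
  | nil => exact hs
  | cons r rest ih => exact ih _ (nodup_markRing _ _ _ hs)

-- the reference list of hit indices, read off the enumeration in order
def pvTarget (coords : List (List (List (List Int)))) (rings : List (Int × Int × Int)) : List Int :=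
  ((PySem.List.enumerate coords 0).filter (fun p => pvPred rings p.2)).map (fun p => p.1)

lemma nodup_target (coords : List (List (List (List Int)))) (rings : List (Int × Int × Int)) :
    (pvTarget coords rings).Nodup := by
  have h := (PySem.List.pairwise_lt_enumerate coords 0).filter (fun p => pvPred rings p.2)
  exact (h.map (fun p => p.1) (fun a b hab => by exact ne_of_lt hab))

lemma mem_target (coords : List (List (List (List Int)))) (rings : List (Int × Int × Int)) (x : Int) :
    x ∈ pvTarget coords rings
      ↔ ∃ p ∈ PySem.List.enumerate coords 0, pvPred rings p.2 = true ∧ x = p.1 := by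
  simp only [pvTarget, List.mem_map, List.mem_filter]
  constructor
  · rintro ⟨p, ⟨hp, hpred⟩, rfl⟩; exact ⟨p, hp, hpred, rfl⟩
  · rintro ⟨p, hp, hpred, rfl⟩; exact ⟨p, ⟨hp, hpred⟩, rfl⟩

lemma length_target (coords : List (List (List (List Int)))) (rings : List (Int × Int × Int)) :
    (pvTarget coords rings).length = (coords.filter (pvPred rings)).length := by
  unfold pvTarget
  rw [List.length_map]
  suffices h : ∀ (s : Int),
      ((PySem.List.enumerate coords s).filter (fun p => pvPred rings p.2)).length
        = (coords.filter (pvPred rings)).length from h 0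
  induction coords with
  | nil => intro s; rfl
  | cons c t ih =>
    intro s
    rw [PySem.List.enumerate_cons]
    by_cases h : pvPred rings c = true
    · rw [List.filter_cons_of_pos (by simpa using h), List.filter_cons_of_pos h,
        List.length_cons, List.length_cons, ih]
    · rw [List.filter_cons_of_neg (by simpa using h), List.filter_cons_of_neg (by simpa using h), ih]

lemma hit_length (coords : List (List (List (List Int)))) (rings : List (Int × Int × Int)) :
    (rings.foldl (pvMarkRing coords) PySem.Set.empty).length
      = (coords.filter (pvPred rings)).length := by
  have hperm : (rings.foldl (pvMarkRing coords) PySem.Set.empty).Perm (pvTarget coords rings) := by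
    refine (List.perm_ext_iff_of_nodup (nodup_hitFold _ _ _ (by simp [PySem.Set.empty])) (nodup_target _ _)).2 ?_
    intro x
    rw [mem_hitFold, mem_target]
    simp [PySem.Set.empty]
  rw [hperm.length_eq, length_target]

-- ===== VERDICT (by name: the statement is the Claim_ definition above) =====
theorem score_bullets_spec : Claim_equal_score_bullets := by
  intro coords rings _ _
  simp only [Spec_score_bullets, score_bullets, score_bullets_alt]
  rw [pvLoopA_spec, hit_length, pvSumDec_eq_formula]
  simp
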